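-- pv_equiv track=rewrite | github.com/IsadoraMoraiss/FlyFood_Project | Algoritmo Genético/algoritmo_genetico.py | gerar_rotulos
-- ===== SOURCE A (Python) =====
-- from typing import List, Tuple, Dict, Optional
--
-- def gerar_rotulos(n: int) -> List[str]:
--     rotulos = []
--     for i in range(n):
--         r = ''
--         temp = i
--         while True:
--             r = chr(65 + temp % 26) + r
--             temp = temp // 26 - 1
--             if temp < 0:
--                 break
--         rotulos.append(r)
--     return rotulos
-- ===== SOURCE B (Python) =====
-- from typing import List
--
-- def gerar_rotulos(n: int) -> List[str]:
--     rotulos = []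
--     cur = []  # current label's letters, least-significant first ('A'..'Z')
--     for _ in range(n):
--         # odometer increment in bijective base 26
--         i = 0
--         while i < len(cur) and cur[i] == 'Z':
--             cur[i] = 'A'
--             i += 1
--         if i == len(cur):
--             cur.append('A')
--         else:
--             cur[i] = chr(ord(cur[i]) + 1)
--         rotulos.append(''.join(reversed(cur)))
--     return rotulos
-- ===== Notes on version B (the rewrite author's own statement) =====
-- stated objective: alternative
-- what changed: B maintains one mutable label and produces each successive label by an odometer-style carry increment (Z->A with carry, append a new 'A' when the carry runs off), instead of A's independent per-index bijective base-26 conversion with an inner division loop.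
import Mathlib
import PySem

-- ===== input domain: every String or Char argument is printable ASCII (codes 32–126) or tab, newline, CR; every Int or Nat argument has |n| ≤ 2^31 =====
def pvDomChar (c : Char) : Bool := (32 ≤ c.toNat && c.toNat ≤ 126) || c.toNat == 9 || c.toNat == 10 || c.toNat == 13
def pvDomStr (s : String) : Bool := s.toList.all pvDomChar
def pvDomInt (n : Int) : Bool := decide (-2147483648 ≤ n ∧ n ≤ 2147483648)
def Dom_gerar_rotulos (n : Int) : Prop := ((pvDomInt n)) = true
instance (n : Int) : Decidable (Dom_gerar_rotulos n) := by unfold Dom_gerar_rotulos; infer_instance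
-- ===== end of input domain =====

-- B replaces A's per-index bijective base-26 conversion (inner division loop per label) by a single
-- odometer-style carry increment of one maintained label; alternative decomposition, same cost.

-- ===== PORT A =====
-- inner 'while True' loop of A: r = chr(65 + temp % 26) + r; temp = temp // 26 - 1; break if temp < 0
def gerar_rotulos_loop (temp : Int) (r : List Char) : List Char :=
  let r' := Char.ofNat (65 + PySem.Int.mod temp 26).toNat :: r
  let temp' := PySem.Int.floordiv temp 26 - 1
  if _h : temp' < 0 then r' else gerar_rotulos_loop temp' r'
termination_by temp.toNat
decreasing_by
  have h26 : PySem.Int.floordiv temp 26 = temp / 26 :=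
    PySem.Int.floordiv_eq_ediv_of_pos (by norm_num)
  simp only [h26] at _h ⊢
  omega

def gerar_rotulos (n : Int) : List String :=
  (PySem.List.pyRange 0 n 1).foldl
    (fun rotulos i => rotulos ++ [String.mk (gerar_rotulos_loop i [])]) []

-- ===== PORT B =====
-- odometer increment on the letters of the current label, least-significant first
def incLabel : List Char → List Char
  | [] => ['A']
  | c :: rest => if c = 'Z' then 'A' :: incLabel rest else Char.ofNat (c.toNat + 1) :: rest

def gerar_rotulos_alt (n : Int) : List String :=
  ((PySem.List.pyRange 0 n 1).foldl
    (fun st _ =>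
      let cur := incLabel st.1
      (cur, st.2 ++ [String.mk cur.reverse]))
    (([] : List Char), ([] : List String))).2

-- ===== PRECONDITION & SPEC =====
def Spec_gerar_rotulos (n : Int) (out : List String) : Prop := out = gerar_rotulos_alt n
instance (n : Int) (out : List String) : Decidable (Spec_gerar_rotulos n out) := by unfold Spec_gerar_rotulos; infer_instance

-- ===== CLAIM (what is proved, stated in full; the proofs are below) =====
def Claim_equal_gerar_rotulos : Prop := ∀ (n : Int), Dom_gerar_rotulos n → Spec_gerar_rotulos n (gerar_rotulos n)

-- ===== LEMMAS AND PROOFS =====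

-- digits of i's bijective base-26 label, least significant first
def bijDigits (i : Nat) : List Char :=
  Char.ofNat (65 + i % 26) :: (if _h : i < 26 then [] else bijDigits (i / 26 - 1))
termination_by i
decreasing_by omega

-- A's inner loop computes exactly the reversed digit list
theorem loopA_eq (i : Nat) : ∀ r : List Char,
    gerar_rotulos_loop (i : Int) r = (bijDigits i).reverse ++ r := by
  induction i using Nat.strong_induction_on with
  | _ i ih =>
    intro r
    rw [gerar_rotulos_loop.eq_def, bijDigits.eq_def]
    have hm : PySem.Int.mod (i : Int) 26 = ((i % 26 : Nat) : Int) :=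
      PySem.Int.mod_natCast i 26
    have hd : PySem.Int.floordiv (i : Int) 26 = ((i / 26 : Nat) : Int) :=
      PySem.Int.floordiv_natCast i 26
    simp only [hm, hd]
    have hch : ((65 : Int) + (i : Int) % 26).toNat = 65 + i % 26 := by omega
    by_cases h : i < 26
    · simp [h]
      rw [if_pos (by omega : (i : Int) / 26 < 1), hch]
    · have hc : ((i / 26 : Nat) : Int) - 1 = ((i / 26 - 1 : Nat) : Int) := by omega
      simp only [hc]
      rw [ih (i / 26 - 1) (by omega)]
      simp [h]
      rw [if_neg (by omega : ¬ ((i / 26 - 1 : Nat) : Int) < 0), hch]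

-- character facts on the 26 letters
theorem char_eq_Z_iff (d : Nat) (hd : d < 26) : (Char.ofNat (65 + d) = 'Z') ↔ d = 25 := by
  interval_cases d <;> decide

theorem char_succ (d : Nat) (hd : d < 25) :
    Char.ofNat ((Char.ofNat (65 + d)).toNat + 1) = Char.ofNat (65 + (d + 1)) := by
  interval_cases d <;> decide

-- odometer increment steps the digit list
theorem incLabel_bijDigits (i : Nat) : incLabel (bijDigits i) = bijDigits (i + 1) := by
  induction i using Nat.strong_induction_on with
  | _ i ih =>
    rw [bijDigits, incLabel]
    by_cases hz : i % 26 = 25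
    · have hZ : Char.ofNat (65 + i % 26) = 'Z' := by
        rw [char_eq_Z_iff _ (by omega)]; exact hz
      rw [if_pos hZ]
      by_cases h : i < 26
      · have hi : i = 25 := by omega
        subst hi
        rw [bijDigits.eq_def 26]
        norm_num
        rw [bijDigits.eq_def 0]
        norm_num
        simp [incLabel]
      · have h1 : ¬ i + 1 < 26 := by omega
        rw [dif_neg h, ih (i / 26 - 1) (by omega)]
        rw [show bijDigits (i + 1) = _ from bijDigits.eq_def (i + 1)]
        rw [dif_neg h1]
        have e1 : (i + 1) % 26 = 0 := by omega
        have e2 : (i + 1) / 26 - 1 = i / 26 - 1 + 1 := by omega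
        rw [e1, e2]
    · have hZ : ¬ Char.ofNat (65 + i % 26) = 'Z' := by
        rw [char_eq_Z_iff _ (by omega)]; omega
      rw [if_neg hZ]
      rw [char_succ _ (by omega)]
      rw [show bijDigits (i + 1) = _ from bijDigits.eq_def (i + 1)]
      have e1 : i % 26 + 1 = (i + 1) % 26 := by omega
      have e2 : (i < 26) = (i + 1 < 26) := by
        simp only [eq_iff_iff]; omega
      have e3 : i / 26 - 1 = (i + 1) / 26 - 1 := by omega
      rw [e1]
      congr 1
      simp only [e3]
      by_cases h : i < 26
      · rw [dif_pos h, dif_pos (by omega : i + 1 < 26)]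
      · rw [dif_neg h, dif_neg (by omega : ¬ i + 1 < 26)]

-- the label held by B before processing step k
def curAt : Nat → List Char
  | 0 => []
  | k + 1 => bijDigits k

theorem incLabel_curAt (k : Nat) : incLabel (curAt k) = bijDigits k := by
  cases k with
  | zero =>
    rw [bijDigits.eq_def 0]
    norm_num [curAt, incLabel]
  | succ k => exact incLabel_bijDigits k

-- invariant of B's fold
theorem foldB_inv (l : List Int) : ∀ (k : Nat) (acc : List String),
    (l.foldl (fun st _ =>
        let cur := incLabel st.1
        (cur, st.2 ++ [String.mk cur.reverse])) (curAt k, acc))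
      = (curAt (k + l.length),
         acc ++ (List.range l.length).map (fun j => String.mk (bijDigits (k + j)).reverse)) := by
  induction l with
  | nil => intro k acc; simp
  | cons x l ih =>
    intro k acc
    simp only [List.foldl_cons, incLabel_curAt]
    have : (bijDigits k, acc ++ [String.mk (bijDigits k).reverse]) = (curAt (k + 1), acc ++ [String.mk (bijDigits k).reverse]) := by
      simp [curAt]
    rw [this, ih (k + 1)]
    have e : k + 1 + l.length = k + (x :: l).length := by simp; omega
    rw [e]
    simp only [List.length_cons, List.range_succ_eq_map, List.map_cons, List.map_map,
      Nat.add_zero, List.append_assoc, List.singleton_append]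
    congr 1
    congr 2
    apply List.map_congr_left
    intro j hj
    have : k + 1 + j = k + j.succ := by omega
    simp only [Function.comp_apply, this]

-- A's fold with back-append is a map
theorem foldA_map (g : Int → String) (l : List Int) : ∀ acc : List String,
    l.foldl (fun rotulos i => rotulos ++ [g i]) acc = acc ++ l.map g := by
  induction l with
  | nil => simp
  | cons x l ih => intro acc; simp [ih]

-- ===== VERDICT (by name: the statement is the Claim_ definition above) =====
theorem gerar_rotulos_spec : Claim_equal_gerar_rotulos := by
  intro n _
  unfold Spec_gerar_rotulos gerar_rotulos gerar_rotulos_alt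
  rw [foldA_map]
  rw [show (([] : List Char), ([] : List String)) = (curAt 0, ([] : List String)) from rfl]
  rw [foldB_inv]
  rw [PySem.List.pyRange_one]
  simp [List.map_map, Function.comp, loopA_eq]
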